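-- pv_equiv track=rewrite | github.com/SergeiNikolenko/LPCE | lpce/cleanup/remove_dna_rna.py | contains_dna_rna_sequence
-- ===== SOURCE A (Python) =====
-- def contains_dna_rna_sequence(content: str) -> bool:
--     """
--     Checks if the content of a PDB file contains DNA or RNA sequences in SEQRES or ATOM lines.
--
--     Args:
--         content (str): The content of the PDB file.
--
--     Returns:
--         bool: True if the file contains DNA or RNA sequences, False otherwise.
--     """
--     nucleotides = {
--         "A",
--         "T",
--         "G",
--         "C",
--         "U",
--         "DA",
--         "DT",
--         "DG",
--         "DC",
--         "DU",
--         "RA",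
--         "RT",
--         "RG",
--         "RC",
--         "RU",
--     }
--     seqres_lines = [line for line in content.splitlines() if line.startswith("SEQRES")]
--     atom_lines = [line for line in content.splitlines() if line.startswith("ATOM")]
--
--     # Check SEQRES lines
--     for line in seqres_lines:
--         sequence = line[19:].split()
--         if any(n in nucleotides for n in sequence):
--             return True
--
--     # Check ATOM lines for specific nucleotide atoms
--     for line in atom_lines:
--         if line[17:20].strip() in nucleotides:
--             return True
--
--     return False
-- ===== SOURCE B (Python) =====
-- NUCLEOTIDES = ("A", "T", "G", "C", "U",
--                "DA", "DT", "DG", "DC", "DU",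
--                "RA", "RT", "RG", "RC", "RU")
--
--
-- def contains_dna_rna_sequence(content: str) -> bool:
--     """Collect every candidate residue name from the file into one set,
--     then probe that set once per nucleotide (loop over the 15 nucleotides,
--     not over the lines, for the final decision)."""
--     residues = set()
--     for line in content.splitlines():
--         if line.startswith("SEQRES"):
--             residues.update(line[19:].split())
--         elif line.startswith("ATOM"):
--             residues.add(line[17:20].strip())
--     return any(n in residues for n in NUCLEOTIDES)
-- ===== Notes on version B (the rewrite author's own statement) =====
-- stated objective: alternative
-- what changed: Inverts the search: instead of scanning lines and testing each extracted token against the nucleotide set with early return, B first accumulates all candidate residue names (SEQRES tokens and ATOM residue fields) into a set, then decides by probing that set once per nucleotide; correct because the result is exactly whether the extracted-residue set and the nucleotide set intersect, which is symmetric and order-independent.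
import Mathlib
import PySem

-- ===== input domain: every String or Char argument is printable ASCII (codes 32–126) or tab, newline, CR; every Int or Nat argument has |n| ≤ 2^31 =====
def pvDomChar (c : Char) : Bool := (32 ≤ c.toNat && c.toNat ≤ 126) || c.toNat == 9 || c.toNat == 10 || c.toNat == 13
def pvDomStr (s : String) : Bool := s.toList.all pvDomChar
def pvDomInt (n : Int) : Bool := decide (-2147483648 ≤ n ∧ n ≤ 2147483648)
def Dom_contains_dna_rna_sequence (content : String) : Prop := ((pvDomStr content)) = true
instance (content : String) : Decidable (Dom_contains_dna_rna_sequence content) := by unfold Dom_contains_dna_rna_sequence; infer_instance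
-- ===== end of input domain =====

-- B inverts the search: it first collects every candidate residue name (SEQRES tokens and
-- ATOM residue fields) into one set, then probes that set once per nucleotide (objective:
-- alternative — the result is whether the two sets intersect, which is symmetric).

-- ===== PORT A =====
-- the Python set literal of nucleotide residue names (membership-only use)
def pvNucleotides : PySem.Set String :=
  PySem.Set.ofList ["A", "T", "G", "C", "U", "DA", "DT", "DG", "DC", "DU",
                    "RA", "RT", "RG", "RC", "RU"]

def contains_dna_rna_sequence (content : String) : Bool :=
  let seqres_lines := (PySem.Str.splitlines content).filter
    (fun line => PySem.Str.startswith line "SEQRES")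
  let atom_lines := (PySem.Str.splitlines content).filter
    (fun line => PySem.Str.startswith line "ATOM")
  -- first for-loop: early return True if any SEQRES token is a nucleotide
  if seqres_lines.any (fun line =>
      (PySem.Str.split₀ (PySem.Str.slice line (some 19) none)).any
        (fun n => PySem.Set.contains pvNucleotides n)) then true
  -- second for-loop: early return True on a nucleotide residue field
  else if atom_lines.any (fun line =>
      PySem.Set.contains pvNucleotides
        (PySem.Str.strip (PySem.Str.slice line (some 17) (some 20)))) then true
  else false

-- ===== PORT B =====
-- the NUCLEOTIDES tuple of Source B (iterated in order by the final any)
def pvNucList : List String :=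
  ["A", "T", "G", "C", "U", "DA", "DT", "DG", "DC", "DU",
   "RA", "RT", "RG", "RC", "RU"]

-- the collect loop: for line in lines: if SEQRES: residues.update(tokens)
--                                      elif ATOM: residues.add(field)
def pvCollect : List String → PySem.Set String → PySem.Set String
  | [], residues => residues
  | line :: rest, residues =>
    pvCollect rest
      (if PySem.Str.startswith line "SEQRES" then
        PySem.Set.update residues (PySem.Str.split₀ (PySem.Str.slice line (some 19) none))
      else if PySem.Str.startswith line "ATOM" then
        PySem.Set.add residues (PySem.Str.strip (PySem.Str.slice line (some 17) (some 20)))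
      else residues)

def contains_dna_rna_sequence_alt (content : String) : Bool :=
  let residues := pvCollect (PySem.Str.splitlines content) PySem.Set.empty
  pvNucList.any (fun n => PySem.Set.contains residues n)

-- ===== PRECONDITION & SPEC =====
def Spec_contains_dna_rna_sequence (content : String) (out : Bool) : Prop := out = contains_dna_rna_sequence_alt content
instance (content : String) (out : Bool) : Decidable (Spec_contains_dna_rna_sequence content out) := by unfold Spec_contains_dna_rna_sequence; infer_instance

-- ===== CLAIM (what is proved, stated in full; the proofs are below) =====
def Claim_equal_contains_dna_rna_sequence : Prop := ∀ (content : String), Dom_contains_dna_rna_sequence content → Spec_contains_dna_rna_sequence content (contains_dna_rna_sequence content)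

-- ===== LEMMAS AND PROOFS =====

-- proof-side spec: the list of candidate residue names a line contributes
def pvExtract (line : String) : List String :=
  if PySem.Str.startswith line "SEQRES" then
    PySem.Str.split₀ (PySem.Str.slice line (some 19) none)
  else if PySem.Str.startswith line "ATOM" then
    [PySem.Str.strip (PySem.Str.slice line (some 17) (some 20))]
  else []

-- how pvExtract evaluates on each kind of line
lemma pv_extract_seqres (l : String) (hs : PySem.Str.startswith l "SEQRES" = true) :
    pvExtract l = PySem.Str.split₀ (PySem.Str.slice l (some 19) none) := by
  unfold pvExtract; rw [hs, if_pos rfl]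

lemma pv_extract_atom (l : String) (hs : PySem.Str.startswith l "SEQRES" = false)
    (ha : PySem.Str.startswith l "ATOM" = true) :
    pvExtract l = [PySem.Str.strip (PySem.Str.slice l (some 17) (some 20))] := by
  unfold pvExtract; rw [hs, ha, if_neg Bool.false_ne_true, if_pos rfl]

lemma pv_extract_other (l : String) (hs : PySem.Str.startswith l "SEQRES" = false)
    (ha : PySem.Str.startswith l "ATOM" = false) : pvExtract l = [] := by
  unfold pvExtract; rw [hs, ha, if_neg Bool.false_ne_true, if_neg Bool.false_ne_true]

-- a line cannot start with both "SEQRES" and "ATOM"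
lemma pv_sw_excl (l : String) (h : PySem.Str.startswith l "SEQRES" = true) :
    PySem.Str.startswith l "ATOM" = false := by
  rw [Bool.eq_false_iff]
  intro h2
  simp only [PySem.Str.startswith_eq] at h h2
  have h1 := (PySem.Chars.startswith_iff _ _).mp h
  have h2' := (PySem.Chars.startswith_iff _ _).mp h2
  rcases List.prefix_or_prefix_of_prefix h1 h2' with hp | hp
  · exact absurd hp (by decide)
  · exact absurd hp (by decide)

-- membership in the collected set = membership in the seed or in some line's extraction
lemma pv_mem_collect (lines : List String) (s : PySem.Set String) (y : String) :
    y ∈ pvCollect lines s ↔ y ∈ s ∨ ∃ l ∈ lines, y ∈ pvExtract l := by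
  induction lines generalizing s with
  | nil => simp [pvCollect]
  | cons l rest ih =>
    simp only [pvCollect, List.exists_mem_cons_iff]
    by_cases hs : PySem.Str.startswith l "SEQRES" = true
    · rw [hs, if_pos rfl, ih, pv_extract_seqres l hs, PySem.Set.mem_update]
      rw [or_assoc]
    · rw [Bool.not_eq_true] at hs
      rw [hs, if_neg Bool.false_ne_true]
      by_cases ha : PySem.Str.startswith l "ATOM" = true
      · rw [ha, if_pos rfl, ih, pv_extract_atom l hs ha, PySem.Set.mem_add,
          List.mem_singleton]
        rw [or_assoc]
      · rw [Bool.not_eq_true] at ha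
        rw [ha, if_neg Bool.false_ne_true, ih, pv_extract_other l hs ha]
        simp only [List.not_mem_nil, false_or]

-- if b then True-return else if c then True-return else False  is  b or c
lemma pv_ite_or (b c : Bool) : (if b then true else if c then true else false) = (b || c) := by
  cases b <;> cases c <;> rfl

-- A's answer, characterised as an existential over the extracted residues
lemma pv_A_iff (content : String) :
    contains_dna_rna_sequence content = true ↔
      ∃ l ∈ PySem.Str.splitlines content, ∃ r ∈ pvExtract l, r ∈ pvNucleotides := by
  unfold contains_dna_rna_sequence
  rw [pv_ite_or]
  simp only [Bool.or_eq_true, List.any_eq_true, List.mem_filter]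
  constructor
  · rintro (⟨l, ⟨hlm, hls⟩, hr⟩ | ⟨l, ⟨hlm, hla⟩, hr⟩)
    · obtain ⟨r, hr1, hr2⟩ := hr
      exact ⟨l, hlm, r, by rw [pv_extract_seqres l hls]; exact hr1,
        (PySem.Set.contains_iff _ _).mp hr2⟩
    · have hls : PySem.Str.startswith l "SEQRES" = false := by
        rw [Bool.eq_false_iff]; intro hc
        exact absurd hla (by rw [pv_sw_excl l hc]; exact Bool.false_ne_true)
      exact ⟨l, hlm, _, by rw [pv_extract_atom l hls hla]; exact List.mem_singleton.mpr rfl,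
        (PySem.Set.contains_iff _ _).mp hr⟩
  · rintro ⟨l, hlm, r, hre, hrn⟩
    by_cases hs : PySem.Str.startswith l "SEQRES" = true
    · rw [pv_extract_seqres l hs] at hre
      exact Or.inl ⟨l, ⟨hlm, hs⟩, ⟨r, hre, (PySem.Set.contains_iff _ _).mpr hrn⟩⟩
    · rw [Bool.not_eq_true] at hs
      by_cases ha : PySem.Str.startswith l "ATOM" = true
      · rw [pv_extract_atom l hs ha] at hre
        rw [List.mem_singleton] at hre
        exact Or.inr ⟨l, ⟨hlm, ha⟩, by rw [← hre]; exact (PySem.Set.contains_iff _ _).mpr hrn⟩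
      · rw [Bool.not_eq_true] at ha
        rw [pv_extract_other l hs ha] at hre
        exact absurd hre (List.not_mem_nil)

-- ===== VERDICT (by name: the statement is the Claim_ definition above) =====
theorem contains_dna_rna_sequence_spec : Claim_equal_contains_dna_rna_sequence := by
  intro content _
  unfold Spec_contains_dna_rna_sequence
  rw [Bool.eq_iff_iff, pv_A_iff]
  unfold contains_dna_rna_sequence_alt
  simp only [List.any_eq_true, PySem.Set.contains_iff, pv_mem_collect]
  constructor
  · rintro ⟨l, hl, r, hr, hn⟩
    refine ⟨r, ?_, Or.inr ⟨l, hl, hr⟩⟩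
    rwa [pvNucleotides, PySem.Set.mem_ofList] at hn
  · rintro ⟨n, hn, h | h⟩
    · exact absurd h (List.not_mem_nil)
    · obtain ⟨l, hl, he⟩ := h
      exact ⟨l, hl, n, he, by rwa [pvNucleotides, PySem.Set.mem_ofList]⟩
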